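-- pv_equiv track=rewrite | github.com/forensicFODs/event_log_analysis_automation_tool | eventlog_streamlit.py | _report_category
-- ===== SOURCE A (Python) =====
-- REPORT_CATEGORY_MAP = {
--     "logon_logoff":       [4624,4625,4634,4647,4648,4768,4769,4776],
--     "service":            [7036,7045,7040,4697],
--     "privilege_use":      [4672,4673,4674],
--     "process_tracking":   [4688,4689],
--     "rdp":                [1149,21,22,23,24,25,4778,4779],
--     "system_event":       [6005,6006,6008,6009,6013],
--     "defender":           [1116,1117,1118,1119,5001],
--     "powershell":         [400,403,4103,4104,4105,4106,800],
-- }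
--
-- def _report_category(eid: int) -> str:
--     try:
--         eid = int(eid)
--     except Exception:
--         return "unknown"
--     for cat, ids in REPORT_CATEGORY_MAP.items():
--         if eid in ids:
--             return cat
--     return "unknown"
-- ===== SOURCE B (Python) =====
-- # Flat table of (event_id, category), sorted by id (ids are unique across the
-- # map), searched with a hand-written binary search instead of A's scan over
-- # every category's list.
-- _TABLE = [
--     (21, "rdp"), (22, "rdp"), (23, "rdp"), (24, "rdp"), (25, "rdp"),
--     (400, "powershell"), (403, "powershell"), (800, "powershell"),
--     (1116, "defender"), (1117, "defender"), (1118, "defender"), (1119, "defender"),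
--     (1149, "rdp"),
--     (4103, "powershell"), (4104, "powershell"), (4105, "powershell"), (4106, "powershell"),
--     (4624, "logon_logoff"), (4625, "logon_logoff"), (4634, "logon_logoff"),
--     (4647, "logon_logoff"), (4648, "logon_logoff"),
--     (4672, "privilege_use"), (4673, "privilege_use"), (4674, "privilege_use"),
--     (4688, "process_tracking"), (4689, "process_tracking"),
--     (4697, "service"),
--     (4768, "logon_logoff"), (4769, "logon_logoff"), (4776, "logon_logoff"),
--     (4778, "rdp"), (4779, "rdp"),
--     (5001, "defender"),
--     (6005, "system_event"), (6006, "system_event"), (6008, "system_event"),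
--     (6009, "system_event"), (6013, "system_event"),
--     (7036, "service"), (7040, "service"), (7045, "service"),
-- ]
--
-- def _report_category(eid: int) -> str:
--     try:
--         eid = int(eid)
--     except Exception:
--         return "unknown"
--     lo, hi = 0, len(_TABLE)
--     while lo < hi:
--         mid = (lo + hi) // 2
--         if _TABLE[mid][0] < eid:
--             lo = mid + 1
--         else:
--             hi = mid
--     if lo < len(_TABLE) and _TABLE[lo][0] == eid:
--         return _TABLE[lo][1]
--     return "unknown"
-- ===== Notes on version B (the rewrite author's own statement) =====
-- stated objective: alternative
-- what changed: Replaces A's linear scan over every category's id list with a binary search over a flat (id, category) table sorted by id (ids are unique, so first-match order is irrelevant).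
import Mathlib
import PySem

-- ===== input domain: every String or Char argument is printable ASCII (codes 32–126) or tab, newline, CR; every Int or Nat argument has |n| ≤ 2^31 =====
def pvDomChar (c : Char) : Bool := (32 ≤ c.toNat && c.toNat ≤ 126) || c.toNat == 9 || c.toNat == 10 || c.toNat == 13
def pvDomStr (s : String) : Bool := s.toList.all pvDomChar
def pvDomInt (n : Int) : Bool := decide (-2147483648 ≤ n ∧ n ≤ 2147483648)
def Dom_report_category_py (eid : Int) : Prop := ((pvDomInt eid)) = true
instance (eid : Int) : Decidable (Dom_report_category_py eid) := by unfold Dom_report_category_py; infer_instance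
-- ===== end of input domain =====

-- B replaces A's per-call scan over every category's id list with a binary search
-- over a flat (id, category) table sorted by id (ids are unique); objective: alternative.

-- ===== PORT A =====
-- REPORT_CATEGORY_MAP as an insertion-ordered association list (dict of str -> list[int])
def reportCategoryMap : List (String × List Int) :=
  [ ("logon_logoff",     [4624,4625,4634,4647,4648,4768,4769,4776]),
    ("service",          [7036,7045,7040,4697]),
    ("privilege_use",    [4672,4673,4674]),
    ("process_tracking", [4688,4689]),
    ("rdp",              [1149,21,22,23,24,25,4778,4779]),
    ("system_event",     [6005,6006,6008,6009,6013]),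
    ("defender",         [1116,1117,1118,1119,5001]),
    ("powershell",       [400,403,4103,4104,4105,4106,800]) ]

-- the 'for cat, ids in REPORT_CATEGORY_MAP.items(): if eid in ids: return cat' loop
-- (int(eid) on an int is the identity and never raises, so the try/except is a no-op here)
def reportCategoryLoop (eid : Int) : List (String × List Int) → String
  | [] => "unknown"
  | (cat, ids) :: rest => if ids.contains eid then cat else reportCategoryLoop eid rest

def report_category_py (eid : Int) : String :=
  reportCategoryLoop eid reportCategoryMap

-- ===== PORT B =====
-- the module-level _TABLE: flat (event_id, category) pairs sorted by id
def reportTable : List (Int × String) :=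
  [ (21, "rdp"), (22, "rdp"), (23, "rdp"), (24, "rdp"), (25, "rdp"),
    (400, "powershell"), (403, "powershell"), (800, "powershell"),
    (1116, "defender"), (1117, "defender"), (1118, "defender"), (1119, "defender"),
    (1149, "rdp"),
    (4103, "powershell"), (4104, "powershell"), (4105, "powershell"), (4106, "powershell"),
    (4624, "logon_logoff"), (4625, "logon_logoff"), (4634, "logon_logoff"),
    (4647, "logon_logoff"), (4648, "logon_logoff"),
    (4672, "privilege_use"), (4673, "privilege_use"), (4674, "privilege_use"),
    (4688, "process_tracking"), (4689, "process_tracking"),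
    (4697, "service"),
    (4768, "logon_logoff"), (4769, "logon_logoff"), (4776, "logon_logoff"),
    (4778, "rdp"), (4779, "rdp"),
    (5001, "defender"),
    (6005, "system_event"), (6006, "system_event"), (6008, "system_event"),
    (6009, "system_event"), (6013, "system_event"),
    (7036, "service"), (7040, "service"), (7045, "service") ]

-- the 'while lo < hi: mid = (lo+hi)//2; …' binary-search loop of Source B.
-- fuel makes the recursion structural; hi - lo shrinks by at least 1 per
-- iteration, so fuel = len(_TABLE) (= initial hi - lo) is never exhausted.
-- (_TABLE[mid] always has 0 ≤ mid < len(_TABLE) here, so getD is exact)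
def bisectLoop (eid : Int) : Nat → Nat → Nat → Nat
  | 0, lo, _ => lo
  | fuel + 1, lo, hi =>
    if lo < hi then
      let mid := (lo + hi) / 2
      if (reportTable.getD mid (0, "")).1 < eid then bisectLoop eid fuel (mid + 1) hi
      else bisectLoop eid fuel lo mid
    else lo

-- 'if lo < len(_TABLE) and _TABLE[lo][0] == eid: return _TABLE[lo][1]; return "unknown"'
def report_category_py_alt (eid : Int) : String :=
  let lo := bisectLoop eid reportTable.length 0 reportTable.length
  if lo < reportTable.length && (reportTable.getD lo (0, "")).1 == eid then
    (reportTable.getD lo (0, "")).2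
  else "unknown"

-- ===== PRECONDITION & SPEC =====
def Spec_report_category_py (eid : Int) (out : String) : Prop := out = report_category_py_alt eid
instance (eid : Int) (out : String) : Decidable (Spec_report_category_py eid out) := by unfold Spec_report_category_py; infer_instance

-- ===== CLAIM (what is proved, stated in full; the proofs are below) =====
def Claim_equal_report_category_py : Prop := ∀ (eid : Int), Dom_report_category_py eid → Spec_report_category_py eid (report_category_py eid)

-- ===== LEMMAS AND PROOFS =====
-- all 42 event ids, in the order A scans them
def allReportIds : List Int :=
  (reportCategoryMap.map (·.2)).flatten

-- for an id in neither table, A's scan falls through and B's final equality test fails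
lemma report_category_unknown_of_not_mem (eid : Int) (h : eid ∉ allReportIds) :
    report_category_py eid = "unknown" ∧ report_category_py_alt eid = "unknown" := by
  simp [allReportIds, reportCategoryMap] at h
  obtain ⟨h1, h2, h3, h4, h5, h6, h7, h8, h9, h10, h11, h12, h13, h14, h15, h16, h17, h18, h19, h20, h21, h22, h23, h24, h25, h26, h27, h28, h29, h30, h31, h32, h33, h34, h35, h36, h37, h38, h39, h40, h41, h42⟩ := h
  constructor
  · simp [report_category_py, reportCategoryMap, reportCategoryLoop, h1, h2, h3, h4, h5, h6, h7, h8, h9, h10, h11, h12, h13, h14, h15, h16, h17, h18, h19, h20, h21, h22, h23, h24, h25, h26, h27, h28, h29, h30, h31, h32, h33, h34, h35, h36, h37, h38, h39, h40, h41, h42]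
  · have hnot : eid ∉ reportTable.map Prod.fst := by
      simp [reportTable]
      omega
    unfold report_category_py_alt
    have hcond : (bisectLoop eid reportTable.length 0 reportTable.length < reportTable.length
        && (reportTable.getD (bisectLoop eid reportTable.length 0 reportTable.length) (0, "")).1 == eid) = false := by
      set lo := bisectLoop eid reportTable.length 0 reportTable.length with hlo
      by_cases hlt : lo < reportTable.length
      · have hne : (reportTable.getD lo (0, "")).1 ≠ eid := by
          intro heq
          apply hnot
          rw [← heq]
          apply List.mem_map_of_mem
          rw [List.getD_eq_getElem _ _ hlt]
          exact List.getElem_mem hlt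
        rw [beq_eq_false_iff_ne.mpr hne, Bool.and_false]
      · simp [hlt]
    simp only [hcond, Bool.false_eq_true, if_false]

-- ===== VERDICT (by name: the statement is the Claim_ definition above) =====
set_option maxRecDepth 4000 in
theorem report_category_py_spec : Claim_equal_report_category_py := by
  intro eid _
  show report_category_py eid = report_category_py_alt eid
  by_cases h : eid ∈ allReportIds
  · simp [allReportIds, reportCategoryMap] at h
    obtain rfl | rfl | rfl | rfl | rfl | rfl | rfl | rfl | rfl | rfl | rfl | rfl | rfl | rfl | rfl | rfl | rfl | rfl | rfl | rfl | rfl | rfl | rfl | rfl | rfl | rfl | rfl | rfl | rfl | rfl | rfl | rfl | rfl | rfl | rfl | rfl | rfl | rfl | rfl | rfl | rfl | rfl := h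
    all_goals decide
  · obtain ⟨hA, hB⟩ := report_category_unknown_of_not_mem eid h
    rw [hA, hB]
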